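-- pv_equiv track=rewrite | github.com/eirikora/NVE_Smartdok | nve_data/resolve_vassdrag.py | normalize_vassdrag_navn
-- ===== SOURCE A (Python) =====
-- def normalize_vassdrag_navn(text: str, ending_map: dict[str, str]) -> str:
--     """
--     Normaliserer et vassdragsnavn ved å mappe endinger til kategorier.
--     Eksempel: 'Storelva' -> 'StorELV', 'Iddefjorden' -> 'IddeFJORD'
--     """
--     stripped = text.strip()
--     if not stripped:
--         return ""
--
--     words = stripped.split()
--     endings_sorted = sorted(ending_map.keys(), key=len, reverse=True)
--     normalized_words = []
--
--     for word in words: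
--         lower_word = word.lower()
--         replaced = False
--
--         # Prøv å matche lengste ending først
--         for ending in endings_sorted:
--             if lower_word.endswith(ending) and len(lower_word) > len(ending):
--                 # Behold den originale casen for stammen, legg til kategorien
--                 cut = len(word) - len(ending)
--                 word = word[:cut] + ending_map[ending]
--                 replaced = True
--                 break
--
--         normalized_words.append(word)
--
--     return " ".join(normalized_words)
-- ===== SOURCE B (Python) =====
-- def normalize_vassdrag_navn(text: str, ending_map: dict[str, str]) -> str:
--     # Different algorithm: instead of scanning every ending (pre-sorted by
--     # length) against each word, probe the dict once per candidate suffix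
--     # length, counting down from min(len(word)-1, longest key) in a while loop.
--     stripped = text.strip()
--     if not stripped:
--         return ""
--     maxlen = 0
--     for k in ending_map:
--         maxlen = max(maxlen, len(k))
--
--     def rewrite(word):
--         lw = word.lower()
--         L = min(len(word) - 1, maxlen)
--         while True:
--             cat = ending_map.get(lw[len(lw) - L:])
--             if cat is not None:
--                 return word[:len(word) - L] + cat
--             if L == 0:
--                 return word
--             L -= 1
--
--     return " ".join(map(rewrite, stripped.split()))
-- ===== Notes on version B (the rewrite author's own statement) =====
-- stated objective: alternative
-- what changed: A pre-sorts all ending keys by length and scans that list against each word; B never sorts or scans the endings: it computes the longest key length once with a loop, then for each word counts suffix lengths down in a while loop, probing the dict once per length, and rewrites words via map with an inner closure instead of a foldl accumulator.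
import Mathlib
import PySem

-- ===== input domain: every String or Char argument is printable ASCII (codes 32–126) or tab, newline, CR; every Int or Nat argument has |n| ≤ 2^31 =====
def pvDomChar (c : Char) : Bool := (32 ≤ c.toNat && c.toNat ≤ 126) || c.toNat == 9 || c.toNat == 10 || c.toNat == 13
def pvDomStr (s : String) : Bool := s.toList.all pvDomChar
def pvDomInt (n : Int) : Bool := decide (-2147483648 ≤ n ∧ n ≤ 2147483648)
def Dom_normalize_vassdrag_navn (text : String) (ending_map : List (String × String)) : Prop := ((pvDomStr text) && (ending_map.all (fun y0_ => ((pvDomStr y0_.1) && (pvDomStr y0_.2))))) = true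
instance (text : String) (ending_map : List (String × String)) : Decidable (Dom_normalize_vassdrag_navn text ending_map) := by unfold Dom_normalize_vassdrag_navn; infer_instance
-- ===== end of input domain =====

-- B replaces A's per-word scan over all endings (sorted by length) by one dict
-- probe per candidate suffix length, tried in a countdown from the longest possible.

-- ===== PORT A =====
-- inner 'for ending in endings_sorted: … break' loop of A (break = return the rewritten word)
def pvAFind (d : PySem.Dict String String) (word lw : List Char) : List String → List Char
  | [] => word
  | e :: rest =>
    if PySem.Chars.endswith lw e.toList && decide (e.toList.length < lw.length) then
      PySem.List.slice word none (some ((word.length : Int) - (e.toList.length : Int))) ++ (d.getD e "").toList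
    else pvAFind d word lw rest

def normalize_vassdrag_navn (text : String) (ending_map : List (String × String)) : String :=
  let stripped := PySem.Str.strip text
  if PySem.Str.len stripped = 0 then ""
  else
    let words := PySem.Str.split₀ stripped
    let d := PySem.Dict.ofList ending_map
    let endings_sorted := PySem.List.sorted d.keys (fun e => PySem.Str.len e) true
    let normalized := words.foldl (fun acc w =>
      acc ++ [String.ofList (pvAFind d w.toList (PySem.Str.lower w).toList endings_sorted)]) []
    PySem.Str.join " " normalized

-- ===== PORT B =====
-- Source B's inner 'while True: … L -= 1' countdown, recursion on L.
-- lw[len(lw)-L:] is ported as List.drop (lw.length - L) and word[:len(word)-L] as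
-- List.take (word.length - L): exact, since both Python bounds are ≥ 0 here.
def pvBRew (d : PySem.Dict String String) (word lw : List Char) : Nat → List Char
  | 0 =>
    match d.get? (String.ofList (lw.drop lw.length)) with
    | some cat => word.take word.length ++ cat.toList
    | none => word
  | Nat.succ L =>
    match d.get? (String.ofList (lw.drop (lw.length - (L + 1)))) with
    | some cat => word.take (word.length - (L + 1)) ++ cat.toList
    | none => pvBRew d word lw L

def normalize_vassdrag_navn_alt (text : String) (ending_map : List (String × String)) : String :=
  let stripped := PySem.Str.strip text
  if PySem.Str.len stripped = 0 then ""
  else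
    let d := PySem.Dict.ofList ending_map
    let maxlen := d.keys.foldl (fun m k => max m k.toList.length) 0
    PySem.Str.join " " ((PySem.Str.split₀ stripped).map (fun w =>
      String.ofList (pvBRew d w.toList (PySem.Str.lower w).toList
        (min (w.toList.length - 1) maxlen))))

-- ===== PRECONDITION & SPEC =====
def Spec_normalize_vassdrag_navn (text : String) (ending_map : List (String × String)) (out : String) : Prop := out = normalize_vassdrag_navn_alt text ending_map
instance (text : String) (ending_map : List (String × String)) (out : String) : Decidable (Spec_normalize_vassdrag_navn text ending_map out) := by unfold Spec_normalize_vassdrag_navn; infer_instance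

-- ===== CLAIM (what is proved, stated in full; the proofs are below) =====
def Claim_equal_normalize_vassdrag_navn : Prop := ∀ (text : String) (ending_map : List (String × String)), Dom_normalize_vassdrag_navn text ending_map → Spec_normalize_vassdrag_navn text ending_map (normalize_vassdrag_navn text ending_map)

-- ===== LEMMAS AND PROOFS =====

-- A's inner loop returns the first ending of the sorted list that matches.
lemma pvAFind_eq_find? (d : PySem.Dict String String) (word lw : List Char) (es : List String) :
    pvAFind d word lw es =
      match es.find? (fun e => PySem.Chars.endswith lw e.toList && decide (e.toList.length < lw.length)) with
      | some e => PySem.List.slice word none (some ((word.length : Int) - (e.toList.length : Int))) ++ (d.getD e "").toList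
      | none => word := by
  induction es with
  | nil => rfl
  | cons e rest ih =>
    rw [show pvAFind d word lw (e :: rest) =
      (if PySem.Chars.endswith lw e.toList && decide (e.toList.length < lw.length) then
        PySem.List.slice word none (some ((word.length : Int) - (e.toList.length : Int))) ++ (d.getD e "").toList
      else pvAFind d word lw rest) from rfl]
    by_cases h : (PySem.Chars.endswith lw e.toList && decide (e.toList.length < lw.length)) = true
    · rw [if_pos h]
      have hf : List.find? (fun e => PySem.Chars.endswith lw e.toList && decide (e.toList.length < lw.length)) (e :: rest) = some e :=
        List.find?_cons_of_pos h
      rw [hf]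
    · rw [if_neg h]
      have hf : List.find? (fun e => PySem.Chars.endswith lw e.toList && decide (e.toList.length < lw.length)) (e :: rest) =
          List.find? (fun e => PySem.Chars.endswith lw e.toList && decide (e.toList.length < lw.length)) rest :=
        List.find?_cons_of_neg h
      rw [hf]
      exact ih

-- first match found in a key-descending list has maximal key among all matches
lemma pv_find?_max {α κ : Type} [LinearOrder κ] (key : α → κ) (p : α → Bool) (es : List α)
    (hp : List.Pairwise (fun a b => key b ≤ key a) es) (e : α)
    (hfind : es.find? p = some e) : ∀ x ∈ es, p x = true → key x ≤ key e := by
  induction es with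
  | nil => simp at hfind
  | cons a rest ih =>
    by_cases ha : p a = true
    · rw [List.find?_cons_of_pos ha, Option.some.injEq] at hfind
      subst hfind
      intro x hx hpx
      rcases List.mem_cons.mp hx with rfl | hx
      · exact le_refl _
      · exact (List.pairwise_cons.mp hp).1 x hx
    · rw [List.find?_cons_of_neg ha] at hfind
      intro x hx hpx
      rcases List.mem_cons.mp hx with rfl | hx
      · exact absurd hpx (by simp [ha])
      · exact ih (List.pairwise_cons.mp hp).2 hfind x hx hpx

-- a successful dict probe at suffix length L exhibits a key that A's test accepts
lemma pv_hit (d : PySem.Dict String String) (lw : List Char) (L : Nat)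
    (hL : L < lw.length) (c : String)
    (hc : d.get? (String.ofList (lw.drop (lw.length - L))) = some c) :
    ∃ k, k ∈ d.keys ∧ k.toList = lw.drop (lw.length - L) ∧ k.toList.length = L ∧
      (PySem.Chars.endswith lw k.toList && decide (k.toList.length < lw.length)) = true := by
  set k := String.ofList (lw.drop (lw.length - L)) with hk
  have htl : k.toList = lw.drop (lw.length - L) := by rw [hk, String.toList_ofList]
  have hlen : k.toList.length = L := by
    rw [htl, List.length_drop]; omega
  refine ⟨k, ?_, htl, hlen, ?_⟩
  · rw [← PySem.Dict.contains_iff_mem_keys]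
    rcases h : d.contains k with _ | _
    · rw [← PySem.Dict.get?_eq_none_iff_contains] at h
      rw [h] at hc; cases hc
    · rfl
  · rw [Bool.and_eq_true]
    constructor
    · rw [PySem.Chars.endswith_iff, htl]
      exact List.drop_suffix _ _
    · rw [hlen]
      simp only [decide_eq_true_eq]
      omega

-- B's countdown passes over every length whose probe fails
lemma pvBRew_skip (d : PySem.Dict String String) (word lw : List Char) (l Lmax : Nat)
    (hle : l ≤ Lmax)
    (h : ∀ L, l < L → L ≤ Lmax → d.get? (String.ofList (lw.drop (lw.length - L))) = none) :
    pvBRew d word lw Lmax = pvBRew d word lw l := by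
  induction Lmax with
  | zero =>
    have : l = 0 := by omega
    rw [this]
  | succ L ih =>
    by_cases hl : l = L + 1
    · rw [hl]
    · have hn := h (L + 1) (by omega) (le_refl _)
      rw [show pvBRew d word lw (L + 1) =
        (match d.get? (String.ofList (lw.drop (lw.length - (L + 1)))) with
         | some cat => word.take (word.length - (L + 1)) ++ cat.toList
         | none => pvBRew d word lw L) from rfl, hn]
      exact ih (by omega) (fun L' h1 h2 => h L' h1 (by omega))

-- a successful probe stops B's countdown
lemma pvBRew_hit (d : PySem.Dict String String) (word lw : List Char) (l : Nat) (cat : String)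
    (hc : d.get? (String.ofList (lw.drop (lw.length - l))) = some cat) :
    pvBRew d word lw l = word.take (word.length - l) ++ cat.toList := by
  cases l with
  | zero =>
    have hc' : d.get? "" = some cat := by simpa using hc
    simp [pvBRew, hc']
  | succ L => simp [pvBRew, hc]

-- per-word core: A's scan of the length-sorted endings = B's countdown over suffix lengths
lemma pv_word (d : PySem.Dict String String) (word lw : List Char) (es : List String) (M : Nat)
    (hw : word ≠ [])
    (hn : lw.length = word.length)
    (hmem : ∀ k, k ∈ es ↔ k ∈ d.keys)
    (hpair : List.Pairwise (fun a b : String => b.toList.length ≤ a.toList.length) es)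
    (hM : ∀ k ∈ d.keys, k.toList.length ≤ M) :
    pvAFind d word lw es = pvBRew d word lw (min (word.length - 1) M) := by
  have hwlen : 1 ≤ word.length := by
    cases word with
    | nil => exact absurd rfl hw
    | cons a t => simp
  set Lmax : Nat := min (word.length - 1) M with hLmax
  have hLmaxlt : Lmax < lw.length := by omega
  set p : String → Bool := fun e => PySem.Chars.endswith lw e.toList && decide (e.toList.length < lw.length) with hpdef
  rw [pvAFind_eq_find? d word lw es]
  rcases hfind : es.find? p with _ | e
  · -- no ending matches: every probe of B fails as well
    have hnone : ∀ x ∈ es, ¬ p x = true := List.find?_eq_none.mp hfind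
    have hfail : ∀ L, L ≤ Lmax → d.get? (String.ofList (lw.drop (lw.length - L))) = none := by
      intro L hLle
      rcases hc : d.get? (String.ofList (lw.drop (lw.length - L))) with _ | c
      · rfl
      · obtain ⟨k, hkk, _, _, hpk⟩ := pv_hit d lw L (by omega) c hc
        exact absurd hpk (hnone k ((hmem k).mpr hkk))
    rw [pvBRew_skip d word lw 0 Lmax (Nat.zero_le _) (fun L h1 h2 => hfail L h2)]
    have h0' : d.get? "" = none := by simpa using hfail 0 (Nat.zero_le _)
    simp [pvBRew, h0']
  · -- e is the matching ending of maximal length; B stops exactly at L = |e|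
    change PySem.List.slice word none (some ((word.length : Int) - (e.toList.length : Int))) ++ (d.getD e "").toList = _
    have hpe : p e = true := List.find?_some hfind
    have hemem : e ∈ d.keys := (hmem e).mp (List.mem_of_find?_eq_some hfind)
    have hpe2 : PySem.Chars.endswith lw e.toList = true ∧ e.toList.length < lw.length := by
      simpa [hpdef] using hpe
    have hsuf := (PySem.Chars.endswith_iff lw e.toList).mp hpe2.1
    set l : Nat := e.toList.length with hl
    have hlt' : l < lw.length := hpe2.2
    have hmax : ∀ x ∈ es, p x = true → x.toList.length ≤ l :=
      pv_find?_max (fun s => s.toList.length) p es hpair e hfind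
    have hetl : e.toList = lw.drop (lw.length - l) := by
      have := List.suffix_iff_eq_drop.mp hsuf
      rw [this, hl]
    have hla : l ≤ Lmax := by
      have h1 := hM e hemem
      omega
    have hskip : ∀ L, l < L → L ≤ Lmax → d.get? (String.ofList (lw.drop (lw.length - L))) = none := by
      intro L h1 h2
      rcases hc : d.get? (String.ofList (lw.drop (lw.length - L))) with _ | c
      · rfl
      · obtain ⟨k, hkk, _, hklen, hpk⟩ := pv_hit d lw L (by omega) c hc
        have := hmax k ((hmem k).mpr hkk) hpk
        omega
    rw [pvBRew_skip d word lw l Lmax hla hskip]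
    rcases hc : d.get? e with _ | v
    · rw [PySem.Dict.get?_eq_none_iff_contains, ← Bool.not_eq_true, PySem.Dict.contains_iff_mem_keys] at hc
      exact absurd hemem hc
    · have hkey : String.ofList (lw.drop (lw.length - l)) = e := by
        rw [← hetl, String.ofList_toList]
      rw [pvBRew_hit d word lw l v (by rw [hkey]; exact hc)]
      rw [PySem.List.slice_to word (show (0:Int) ≤ (word.length : Int) - (e.toList.length : Int) by omega)]
      have h1 : (((word.length : Int) - (e.toList.length : Int))).toNat = word.length - l := by omega
      rw [h1, PySem.Dict.getD_eq_get?_getD, hc]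
      rfl

-- every piece produced by Python's whitespace split is nonempty
lemma pv_split₀_go_ne_nil : ∀ (s cur : List Char) (acc : List (List Char)),
    (∀ w ∈ acc, w ≠ []) → ∀ w ∈ PySem.Chars.split₀.go s cur acc, w ≠ [] := by
  intro s
  induction s with
  | nil =>
    intro cur acc hacc w hw
    simp only [PySem.Chars.split₀.go] at hw
    by_cases hcur : cur.isEmpty = true
    · rw [if_pos hcur] at hw
      exact hacc w (List.mem_reverse.mp hw)
    · rw [if_neg hcur] at hw
      rcases List.mem_cons.mp (List.mem_reverse.mp hw) with rfl | hw'
      · simp only [ne_eq, List.reverse_eq_nil_iff]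
        intro h; rw [h] at hcur; exact hcur rfl
      · exact hacc w hw'
  | cons c rest ih =>
    intro cur acc hacc w hw
    simp only [PySem.Chars.split₀.go] at hw
    by_cases hsp : PySem.Chars.isspace c = true
    · rw [if_pos hsp] at hw
      by_cases hcur : cur.isEmpty = true
      · rw [if_pos hcur] at hw
        exact ih [] acc hacc w hw
      · rw [if_neg hcur] at hw
        refine ih [] (cur.reverse :: acc) ?_ w hw
        intro x hx
        rcases List.mem_cons.mp hx with rfl | hx'
        · simp only [ne_eq, List.reverse_eq_nil_iff]
          intro h; rw [h] at hcur; exact hcur rfl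
        · exact hacc x hx'
    · rw [if_neg hsp] at hw
      exact ih (c :: cur) acc hacc w hw

lemma pv_split₀_ne_nil (s : String) (w : String) (hw : w ∈ PySem.Str.split₀ s) :
    w.toList ≠ [] := by
  have h : w.toList ∈ (PySem.Str.split₀ s).map String.toList := List.mem_map_of_mem hw
  rw [PySem.Str.split₀_map_toList] at h
  exact pv_split₀_go_ne_nil s.toList [] [] (by intro x hx; cases hx) w.toList h

-- A's foldl-with-append accumulator is a map
lemma pv_foldl_append_map {α β : Type} (f : α → β) (l : List α) (acc : List β) :
    l.foldl (fun acc w => acc ++ [f w]) acc = acc ++ l.map f := by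
  induction l generalizing acc with
  | nil => simp
  | cons a t ih => simp [ih]

-- ===== VERDICT (by name: the statement is the Claim_ definition above) =====
theorem normalize_vassdrag_navn_spec : Claim_equal_normalize_vassdrag_navn := by
  intro text ending_map _
  unfold Spec_normalize_vassdrag_navn
  unfold normalize_vassdrag_navn normalize_vassdrag_navn_alt
  by_cases h0 : PySem.Str.len (PySem.Str.strip text) = 0
  · simp only [if_pos h0]
  · simp only [if_neg h0]
    refine congrArg (PySem.Str.join " ") ?_
    set d := PySem.Dict.ofList ending_map with hd
    set M : Nat := d.keys.foldl (fun m k => max m k.toList.length) 0 with hMdef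
    have hM : ∀ k ∈ d.keys, k.toList.length ≤ M :=
      (PySem.List.le_foldl_max_nat d.keys (fun k => k.toList.length) 0).2
    have hpair : List.Pairwise (fun a b : String => b.toList.length ≤ a.toList.length)
        (PySem.List.sorted d.keys (fun e => PySem.Str.len e) true) := by
      have h := PySem.List.sorted_pairwise_rev d.keys (fun e => PySem.Str.len e)
      exact h.imp (fun hab => by simpa [PySem.Str.len_eq] using hab)
    rw [pv_foldl_append_map, List.nil_append]
    refine List.map_congr_left ?_
    intro w hwmem
    have hwne : w.toList ≠ [] := pv_split₀_ne_nil _ w hwmem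
    have hlen : ((PySem.Str.lower w).toList).length = w.toList.length := by
      rw [PySem.Str.toList_lower]
      simp [PySem.Chars.lower]
    refine congrArg String.ofList ?_
    exact pv_word d w.toList (PySem.Str.lower w).toList
      (PySem.List.sorted d.keys (fun e => PySem.Str.len e) true) M
      hwne hlen
      (fun k => PySem.List.mem_sorted d.keys (fun e => PySem.Str.len e) true k)
      hpair hM
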